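-- pv_equiv track=rewrite | github.com/yang4978/-OJ | Python/1814. 【认证试题】代码缩进.py | get_min_step
-- ===== SOURCE A (Python) =====
-- def get_min_step(steps):
--     steps.append(0)
--     res = 0
--     max_num = 0
--     min_num = 0
--     flag = 0
--     last = 0
--
--     for n in steps:
--         if(flag == 0 and n < last):
--             flag = 1
--             max_num = last
--         elif(flag == 1 and n > last):
--             flag = 0
--             res = res + max_num - min_num
--             max_num = 0
--             min_num = last
--         last = n
--
--     return res + max_num - min_num
-- ===== SOURCE B (Python) =====
-- def get_min_step(steps):
--     # One pass summing consecutive decreases; keeps A's steps.append(0) mutation.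
--     steps.append(0)
--     res = 0
--     prev = 0
--     for n in steps:
--         if prev > n:
--             res += prev - n
--         prev = n
--     return res
-- ===== Notes on version B (the rewrite author's own statement) =====
-- stated objective: simpler
-- what changed: Replaced the flag/max_num/min_num peak-and-valley state machine with a single accumulator summing consecutive decreases (prev and res only), using that the series starts and ends at 0.
import Mathlib
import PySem

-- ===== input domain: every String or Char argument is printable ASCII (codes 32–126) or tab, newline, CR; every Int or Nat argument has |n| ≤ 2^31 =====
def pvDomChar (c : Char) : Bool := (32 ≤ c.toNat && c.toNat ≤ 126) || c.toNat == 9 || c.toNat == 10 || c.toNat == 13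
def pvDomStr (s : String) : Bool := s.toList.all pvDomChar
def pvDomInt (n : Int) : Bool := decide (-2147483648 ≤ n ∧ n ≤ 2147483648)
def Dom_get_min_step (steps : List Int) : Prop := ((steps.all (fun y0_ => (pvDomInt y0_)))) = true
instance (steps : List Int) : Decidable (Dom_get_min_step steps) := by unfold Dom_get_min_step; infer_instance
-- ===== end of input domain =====

-- ===== PORT A =====
def pvStepA (st : Int × Int × Int × Int × Int) (n : Int) : Int × Int × Int × Int × Int :=
  let (res, mx, mn, flag, last) := st
  if flag = 0 ∧ n < last then (res, last, mn, 1, n)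
  else if flag = 1 ∧ n > last then (res + mx - mn, 0, last, 0, n)
  else (res, mx, mn, flag, n)

-- A: steps.append(0), then a flag/max_num/min_num state machine; returns res + max_num - min_num
def get_min_step (steps : List Int) : Int :=
  let s := (steps ++ [0]).foldl pvStepA (0, 0, 0, 0, 0)
  s.1 + s.2.1 - s.2.2.1

-- ===== PORT B =====
def pvStepB (st : Int × Int) (n : Int) : Int × Int :=
  (if st.2 > n then st.1 + st.2 - n else st.1, n)

-- B: steps.append(0), then one pass summing consecutive decreases (prev > n)
def get_min_step_alt (steps : List Int) : Int :=
  ((steps ++ [0]).foldl pvStepB (0, 0)).1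

-- ===== PRECONDITION & SPEC =====
def Spec_get_min_step (steps : List Int) (out : Int) : Prop := out = get_min_step_alt steps
instance (steps : List Int) (out : Int) : Decidable (Spec_get_min_step steps out) := by unfold Spec_get_min_step; infer_instance

-- ===== CLAIM (what is proved, stated in full; the proofs are below) =====
def Claim_equal_get_min_step : Prop := ∀ (steps : List Int), Dom_get_min_step steps → Spec_get_min_step steps (get_min_step steps)

-- ===== LEMMAS AND PROOFS =====

-- Invariant tying A's (res, mx, mn, flag, last) to B's (rb, prev = last):
-- flag = 0: mx = 0 and rb = res - mn;  flag = 1: rb = res + mx - mn - last.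
theorem pv_key (l : List Int) : ∀ (res mx mn flag last rb : Int),
    ((flag = 0 ∧ mx = 0 ∧ rb = res - mn) ∨ (flag = 1 ∧ rb = res + mx - mn - last)) →
    (let s := (l ++ [0]).foldl pvStepA (res, mx, mn, flag, last)
     s.1 + s.2.1 - s.2.2.1) = ((l ++ [0]).foldl pvStepB (rb, last)).1 := by
  induction l with
  | nil =>
    intro res mx mn flag last rb h
    simp only [List.nil_append, List.foldl_cons, List.foldl_nil, pvStepA, pvStepB]
    rcases h with ⟨hf, hmx, hrb⟩ | ⟨hf, hrb⟩ <;> subst hf <;> split_ifs <;>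
      simp_all <;> omega
  | cons n l ih =>
    intro res mx mn flag last rb h
    simp only [List.cons_append, List.foldl_cons, pvStepA, pvStepB]
    rcases h with ⟨hf, hmx, hrb⟩ | ⟨hf, hrb⟩ <;> subst hf <;> split_ifs <;>
      first
        | (apply ih; left; constructor; rfl; constructor <;> omega)
        | (apply ih; right; constructor; rfl; omega)

-- ===== VERDICT (by name: the statement is the Claim_ definition above) =====
theorem get_min_step_spec : Claim_equal_get_min_step := by
  intro steps _
  unfold Spec_get_min_step get_min_step get_min_step_alt
  exact pv_key steps 0 0 0 0 0 0 (Or.inl ⟨rfl, rfl, by ring⟩)
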